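-- pv_equiv track=rewrite | github.com/imehtn/TIP_102 | Unit2/sess2/v1_standardproblems.py | count_unique_species
-- ===== SOURCE A (Python) =====
-- def count_unique_species(ecosystem_data):
--     new_str = ""
--     for char in ecosystem_data:
--         if char.isdigit():
--             if int(char) != 0:
--                 new_str += char
--         else:
--             new_str += " "
--
--     nums = new_str.split()
--
--     return len(set(nums))
-- ===== SOURCE B (Python) =====
-- def count_unique_species(ecosystem_data):
--     seen = set()
--     token = ""
--     for char in ecosystem_data:
--         if char.isdigit():
--             if char != '0':
--                 token += char
--         else:
--             if token:
--                 seen.add(token)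
--             token = ""
--     if token:
--         seen.add(token)
--     return len(seen)
-- ===== Notes on version B (the rewrite author's own statement) =====
-- stated objective: faster
-- what changed: B streams the input once, accumulating the current nonzero-digit token and flushing completed tokens directly into a set, instead of A's build-a-translated-string then split() then set() pipeline.
import Mathlib
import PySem

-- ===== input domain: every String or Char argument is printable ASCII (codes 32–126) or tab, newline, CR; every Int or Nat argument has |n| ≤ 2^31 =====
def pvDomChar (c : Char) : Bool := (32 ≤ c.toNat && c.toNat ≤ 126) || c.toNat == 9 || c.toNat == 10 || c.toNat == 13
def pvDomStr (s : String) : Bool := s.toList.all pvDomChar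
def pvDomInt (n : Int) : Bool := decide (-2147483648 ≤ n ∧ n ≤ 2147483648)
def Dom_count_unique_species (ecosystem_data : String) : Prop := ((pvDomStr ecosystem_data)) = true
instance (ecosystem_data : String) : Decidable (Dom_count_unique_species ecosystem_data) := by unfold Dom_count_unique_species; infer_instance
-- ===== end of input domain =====

-- B replaces A's build-translated-string / split() / set() pipeline by a single streaming pass
-- that flushes completed nonzero-digit tokens directly into a set (measured constant-factor speedup).

-- ===== PORT A =====
-- int(char) always succeeds on the ASCII digits Chars.isdigit accepts, so the getD 0 default is unreachable.
def count_unique_species (ecosystem_data : String) : Int :=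
  let new_str := ecosystem_data.toList.foldl
    (fun acc c =>
      if PySem.Chars.isdigit c then
        if (PySem.Int.ofChars? [c]).getD 0 ≠ 0 then acc ++ [c] else acc
      else acc ++ [' ']) []
  let nums := PySem.Chars.split₀ new_str
  PySem.Set.len (PySem.Set.ofList nums)

-- ===== PORT B =====
def count_unique_species_alt (ecosystem_data : String) : Int :=
  let st := ecosystem_data.toList.foldl
    (fun (st : PySem.Set (List Char) × List Char) c =>
      if PySem.Chars.isdigit c then
        if c ≠ '0' then (st.1, st.2 ++ [c]) else st
      else
        if st.2.isEmpty then (st.1, []) else (PySem.Set.add st.1 st.2, []))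
    (PySem.Set.empty, [])
  if st.2.isEmpty then PySem.Set.len st.1 else PySem.Set.len (PySem.Set.add st.1 st.2)

-- ===== PRECONDITION & SPEC =====
def Spec_count_unique_species (ecosystem_data : String) (out : Int) : Prop := out = count_unique_species_alt ecosystem_data
instance (ecosystem_data : String) (out : Int) : Decidable (Spec_count_unique_species ecosystem_data out) := by unfold Spec_count_unique_species; infer_instance

-- ===== CLAIM (what is proved, stated in full; the proofs are below) =====
def Claim_equal_count_unique_species : Prop := ∀ (ecosystem_data : String), Dom_count_unique_species ecosystem_data → Spec_count_unique_species ecosystem_data (count_unique_species ecosystem_data)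

-- ===== LEMMAS AND PROOFS =====

-- the per-character contribution of A's translation loop
def pvF (c : Char) : List Char :=
  if PySem.Chars.isdigit c then
    if (PySem.Int.ofChars? [c]).getD 0 ≠ 0 then [c] else []
  else [' ']

-- B's loop step
def pvStepB (st : PySem.Set (List Char) × List Char) (c : Char) : PySem.Set (List Char) × List Char :=
  if PySem.Chars.isdigit c then
    if c ≠ '0' then (st.1, st.2 ++ [c]) else st
  else
    if st.2.isEmpty then (st.1, []) else (PySem.Set.add st.1 st.2, [])

-- the induction statement: folding A's remaining tokens into `seen` equals running B from (seen, tok)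
def pvMainStmt (cs tok : List Char) (seen : PySem.Set (List Char)) : Prop :=
  (PySem.Chars.split₀.go (cs.flatMap pvF) tok.reverse []).foldl PySem.Set.add seen =
  (let st := cs.foldl pvStepB (seen, tok);
   if st.2.isEmpty then st.1 else PySem.Set.add st.1 st.2)

lemma pvDigitCases (c : Char) (h : PySem.Chars.isdigit c = true) :
    c = '0' ∨ c = '1' ∨ c = '2' ∨ c = '3' ∨ c = '4' ∨ c = '5' ∨ c = '6' ∨ c = '7' ∨ c = '8' ∨ c = '9' := by
  simp [PySem.Chars.isdigit, Char.le_def] at h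
  obtain ⟨h1, h2⟩ := h
  have hv1 : 48 ≤ c.val.toNat := by simpa [UInt32.le_iff_toNat_le] using h1
  have hv2 : c.val.toNat ≤ 57 := by simpa [UInt32.le_iff_toNat_le] using h2
  interval_cases hn : c.val.toNat <;> simp_all [Char.ext_iff, UInt32.toNat_inj.symm]

lemma pvBuildA (cs : List Char) (acc : List Char) :
    cs.foldl (fun acc c =>
      if PySem.Chars.isdigit c then
        if (PySem.Int.ofChars? [c]).getD 0 ≠ 0 then acc ++ [c] else acc
      else acc ++ [' ']) acc = acc ++ cs.flatMap pvF := by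
  induction cs generalizing acc with
  | nil => simp
  | cons c cs ih =>
    simp only [List.foldl_cons, List.flatMap_cons, ih, pvF]
    split_ifs <;> simp

lemma pvGoAcc (s : List Char) (cur : List Char) (acc : List (List Char)) :
    PySem.Chars.split₀.go s cur acc = acc.reverse ++ PySem.Chars.split₀.go s cur [] := by
  induction s generalizing cur acc with
  | nil => simp [PySem.Chars.split₀.go]; split_ifs <;> simp
  | cons c s ih =>
    simp only [PySem.Chars.split₀.go]
    split_ifs with h1 h2
    · exact ih [] acc
    · rw [ih [] (cur.reverse :: acc), ih [] [cur.reverse]]; simp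
    · exact ih _ _

lemma pvConsNonzero (c : Char) (cs tok : List Char) (seen : PySem.Set (List Char))
    (hd : PySem.Chars.isdigit c = true) (hs : PySem.Chars.isspace c = false)
    (hz : (PySem.Int.ofChars? [c]).getD 0 ≠ 0) (hc : c ≠ '0')
    (ih : ∀ tok seen, pvMainStmt cs tok seen) : pvMainStmt (c :: cs) tok seen := by
  unfold pvMainStmt at *
  simp only [List.flatMap_cons, pvF, hd, if_pos, hz, List.cons_append,
    List.nil_append, List.foldl_cons, pvStepB, hc, ne_eq, not_false_iff]
  rw [show PySem.Chars.split₀.go (c :: cs.flatMap pvF) tok.reverse [] =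
        PySem.Chars.split₀.go (cs.flatMap pvF) (c :: tok.reverse) [] by
      simp [PySem.Chars.split₀.go, hs]]
  rw [show c :: tok.reverse = (tok ++ [c]).reverse by simp]
  simpa using ih (tok ++ [c]) seen

lemma pvMain (cs tok : List Char) (seen : PySem.Set (List Char)) : pvMainStmt cs tok seen := by
  induction cs generalizing tok seen with
  | nil =>
    unfold pvMainStmt
    simp only [List.flatMap_nil, List.foldl_nil, PySem.Chars.split₀.go]
    by_cases h : tok = [] <;> simp [h]
  | cons c cs ih =>
    by_cases hd : PySem.Chars.isdigit c = true
    · rcases pvDigitCases c hd with h|h|h|h|h|h|h|h|h|h <;> subst h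
      · unfold pvMainStmt
        have h0 : PySem.Chars.isdigit '0' = true := by decide
        have hz : (PySem.Int.ofChars? ['0']).getD 0 = 0 := by decide
        simpa [pvMainStmt, pvF, pvStepB, h0, hz] using ih tok seen
      all_goals exact pvConsNonzero _ cs tok seen (by decide) (by decide) (by decide) (by decide) ih
    · -- non-digit: the character becomes a separator
      unfold pvMainStmt at *
      by_cases ht : tok = []
      · subst ht
        simpa [pvF, pvStepB, hd, PySem.Chars.split₀.go] using ih [] seen
      · have hne : (tok.reverse).isEmpty = false := by simp [ht]
        simp only [List.flatMap_cons, pvF, hd, List.foldl_cons, pvStepB,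
          Bool.false_eq_true, if_false, List.cons_append, List.nil_append]
        have hsp : PySem.Chars.isspace ' ' = true := by decide
        rw [show PySem.Chars.split₀.go (' ' :: cs.flatMap pvF) tok.reverse [] =
              PySem.Chars.split₀.go (cs.flatMap pvF) [] [tok.reverse.reverse] by
            simp [PySem.Chars.split₀.go, hsp, hne]]
        rw [pvGoAcc]
        simp only [List.reverse_reverse, List.reverse_cons, List.reverse_nil, List.nil_append,
          List.foldl_append, List.foldl_cons, List.foldl_nil]
        have h2 := ih [] (PySem.Set.add seen tok)
        simp only [List.reverse_nil] at h2
        rw [h2]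
        simp [ht]

-- ===== VERDICT (by name: the statement is the Claim_ definition above) =====
theorem count_unique_species_spec : Claim_equal_count_unique_species := by
  intro s _
  unfold Spec_count_unique_species count_unique_species count_unique_species_alt
  rw [pvBuildA]
  have hm := pvMain s.toList [] PySem.Set.empty
  unfold pvMainStmt at hm
  simp only [List.reverse_nil] at hm
  show PySem.Set.len (PySem.Set.ofList (PySem.Chars.split₀ ([] ++ s.toList.flatMap pvF))) = _
  rw [List.nil_append]
  unfold PySem.Chars.split₀
  rw [show (PySem.Set.ofList (PySem.Chars.split₀.go (s.toList.flatMap pvF) [] []) : PySem.Set (List Char)) =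
        (PySem.Chars.split₀.go (s.toList.flatMap pvF) [] []).foldl PySem.Set.add PySem.Set.empty from
      PySem.Set.ofList_eq_foldl _]
  rw [hm]
  show _ = (if (List.foldl pvStepB (PySem.Set.empty, []) s.toList).2.isEmpty then _ else _)
  split_ifs <;> rfl
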